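-- pv_equiv track=rewrite | github.com/buckley-w-david/advent-of-code | 2024/day14/day14.py | suspicious
-- ===== SOURCE A (Python) =====
-- from collections import defaultdict
-- from itertools import pairwise
--
-- def suspicious(robots, tolerance=10):
--     rb = defaultdict(set)
--     for (x, y), _ in robots:
--         rb[y].add(x)
--
--     for _, xs in rb.items():
--         consecutive = 0
--         for a, b in pairwise(sorted(xs)):
--             consecutive += a + 1 == b
--             if consecutive > tolerance:
--                 return True
--     return False
-- ===== SOURCE B (Python) =====
-- from collections import defaultdict
--
--
-- def suspicious(robots, tolerance=10):
--     rows = defaultdict(set)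
--     for (x, y), _ in robots:
--         rows[y].add(x)
--     return any(sum(x + 1 in xs for x in xs) > tolerance for xs in rows.values())
-- ===== Notes on version B (the rewrite author's own statement) =====
-- stated objective: alternative
-- what changed: Replaces each row's sort + pairwise scan with a set-membership successor count (for each x, is x+1 in the row's set), folded into a single any(); no sorting and no explicit counter loop.
-- outside the precondition, e.g. on suspicious([((0, 0), (0, 0))], -1): A returns False, B returns True
import Mathlib
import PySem

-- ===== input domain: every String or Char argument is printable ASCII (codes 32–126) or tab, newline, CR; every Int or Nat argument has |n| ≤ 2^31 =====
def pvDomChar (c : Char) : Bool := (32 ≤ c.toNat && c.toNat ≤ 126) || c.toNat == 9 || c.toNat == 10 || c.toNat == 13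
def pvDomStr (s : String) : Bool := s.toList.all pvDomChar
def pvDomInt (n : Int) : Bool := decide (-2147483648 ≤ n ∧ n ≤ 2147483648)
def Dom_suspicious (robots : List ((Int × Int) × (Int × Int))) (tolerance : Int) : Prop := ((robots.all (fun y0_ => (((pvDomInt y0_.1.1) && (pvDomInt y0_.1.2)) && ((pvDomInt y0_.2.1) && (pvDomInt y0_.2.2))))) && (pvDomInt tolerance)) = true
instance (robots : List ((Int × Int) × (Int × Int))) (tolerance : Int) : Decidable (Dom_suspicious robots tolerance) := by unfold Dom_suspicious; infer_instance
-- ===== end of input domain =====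

-- B replaces A's per-row sort + pairwise counter scan with a set-membership successor
-- count ('x+1 in xs' for each x of the row) folded into a single any() (objective: alternative).

-- shared grouping helper: both Pythons build the same dict {y : set of x}
def pvBuildRows (robots : List ((Int × Int) × (Int × Int))) : PySem.Dict Int (PySem.Set Int) :=
  robots.foldl
    (fun d p => d.insert p.1.2 (PySem.Set.add (d.getD p.1.2 PySem.Set.empty) p.1.1))
    PySem.Dict.empty

-- ===== PORT A =====
-- inner loop 'for a, b in pairwise(sorted(xs)): consecutive += a+1 == b; if consecutive > tolerance: return True'
def pvScanA (tolerance : Int) : Int → Int → List Int → Bool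
  | c, a, b :: rest =>
    let c' := c + (if a + 1 = b then 1 else 0)
    if c' > tolerance then true else pvScanA tolerance c' b rest
  | _, _, [] => false

def pvRowA (tolerance : Int) (xs : PySem.Set Int) : Bool :=
  match PySem.List.sorted xs (fun x => x) false with
  | [] => false
  | a :: rest => pvScanA tolerance 0 a rest

def pvLoopA (tolerance : Int) : List (Int × PySem.Set Int) → Bool
  | [] => false
  | (_, xs) :: rest => if pvRowA tolerance xs then true else pvLoopA tolerance rest

def suspicious (robots : List ((Int × Int) × (Int × Int))) (tolerance : Int) : Bool :=
  pvLoopA tolerance (pvBuildRows robots).items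

-- ===== PORT B =====
-- sum(x + 1 in xs for x in xs); order of iteration over the set does not matter for a sum
def pvCountSucc (xs : PySem.Set Int) : Int :=
  xs.foldl (fun n x => n + (if PySem.Set.contains xs (x + 1) then 1 else 0)) 0

def suspicious_alt (robots : List ((Int × Int) × (Int × Int))) (tolerance : Int) : Bool :=
  (pvBuildRows robots).values.any (fun xs => pvCountSucc xs > tolerance)

-- ===== PRECONDITION & SPEC =====
-- Pre_ excludes only the degenerate corner: negative tolerance with a nonempty grid in which all
-- robots sharing a y also share their x (every row holds a single x). A negative tolerance is
-- outside the natural domain of a count threshold, and there A's pairwise loop never performs a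
-- check on a single-x row (returns False) while B's per-row count (0 > tolerance) returns True;
-- both values are defensible on this unspecified corner.
def Pre_suspicious (robots : List ((Int × Int) × (Int × Int))) (tolerance : Int) : Prop :=
  0 ≤ tolerance ∨ robots = [] ∨
    ∃ r ∈ robots, ∃ r' ∈ robots, r.1.2 = r'.1.2 ∧ r.1.1 ≠ r'.1.1
instance (robots : List ((Int × Int) × (Int × Int))) (tolerance : Int) : Decidable (Pre_suspicious robots tolerance) := by unfold Pre_suspicious; infer_instance

def pvWitness_suspicious : (List ((Int × Int) × (Int × Int))) × Int :=
  ([((0, 0), (1, 1)), ((1, 0), (2, 2)), ((3, 0), (0, 0))], 1)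

def Spec_suspicious (robots : List ((Int × Int) × (Int × Int))) (tolerance : Int) (out : Bool) : Prop := out = suspicious_alt robots tolerance
instance (robots : List ((Int × Int) × (Int × Int))) (tolerance : Int) (out : Bool) : Decidable (Spec_suspicious robots tolerance out) := by unfold Spec_suspicious; infer_instance

-- ===== CLAIM (what is proved, stated in full; the proofs are below) =====
def Claim_equal_suspicious : Prop := ∀ (robots : List ((Int × Int) × (Int × Int))) (tolerance : Int), Dom_suspicious robots tolerance → Pre_suspicious robots tolerance → Spec_suspicious robots tolerance (suspicious robots tolerance)

-- ===== LEMMAS AND PROOFS =====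

-- number of adjacent pairs (a, a+1) in a list: what A's inner counter totals
def pvAdj : List Int → Int
  | a :: b :: t => (if a + 1 = b then 1 else 0) + pvAdj (b :: t)
  | _ => 0

lemma pvAdj_nonneg (l : List Int) : 0 ≤ pvAdj l := by
  fun_induction pvAdj l with
  | case1 a b t ih => dsimp [pvAdj]; split <;> omega
  | case2 => exact le_refl 0

lemma pvScanA_eq (tolerance : Int) (l : List Int) : ∀ (a c : Int), c ≤ tolerance →
    pvScanA tolerance c a l = decide (tolerance < c + pvAdj (a :: l)) := by
  induction l with
  | nil => intro a c hc; simp [pvScanA, pvAdj]; omega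
  | cons b rest ih =>
    intro a c hc
    have hadj := pvAdj_nonneg (b :: rest)
    simp only [pvScanA]
    by_cases h : c + (if a + 1 = b then 1 else 0) > tolerance
    · rw [if_pos h]
      have : tolerance < c + pvAdj (a :: b :: rest) := by
        simp only [pvAdj]; omega
      simp [this]
    · rw [if_neg h, ih b _ (by omega)]
      simp only [pvAdj, add_assoc]
      rfl

lemma pvScanA_of_neg (tolerance : Int) (h : tolerance < 0) (b : Int) (rest : List Int)
    (a c : Int) (hc : 0 ≤ c) : pvScanA tolerance c a (b :: rest) = true := by
  simp only [pvScanA]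
  have : c + (if a + 1 = b then 1 else 0) > tolerance := by split <;> omega
  simp [this]

lemma pvCountSucc_eq_sum (xs : PySem.Set Int) :
    pvCountSucc xs = (xs.map (fun x => if (x + 1) ∈ xs then (1 : Int) else 0)).sum := by
  unfold pvCountSucc
  rw [PySem.List.foldl_add (g := fun x => if PySem.Set.contains xs (x + 1) then (1 : Int) else 0)]
  simp [PySem.Set.contains_eq_listContains]

lemma pvCountSucc_nonneg (xs : PySem.Set Int) : 0 ≤ pvCountSucc xs := by
  rw [pvCountSucc_eq_sum]
  apply List.sum_nonneg
  intro x hx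
  simp only [List.mem_map] at hx
  obtain ⟨y, _, rfl⟩ := hx
  split <;> omega

-- on a strictly increasing list, the adjacent-pair count is the successor count
lemma pvAdj_eq_sum (L : List Int) (h : L.Pairwise (· < ·)) :
    pvAdj L = (L.map (fun x => if (x + 1) ∈ L then (1 : Int) else 0)).sum := by
  induction L with
  | nil => simp [pvAdj]
  | cons a t ih =>
    rcases List.pairwise_cons.mp h with ⟨ha, ht⟩
    have hmapt : t.map (fun x => if (x + 1) ∈ (a :: t) then (1 : Int) else 0)
        = t.map (fun x => if (x + 1) ∈ t then (1 : Int) else 0) := by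
      apply List.map_congr_left
      intro x hx
      have hax : a < x := ha x hx
      have : ((x + 1) ∈ (a :: t)) ↔ ((x + 1) ∈ t) := by
        simp only [List.mem_cons]
        constructor
        · rintro (h1 | h1)
          · omega
          · exact h1
        · intro h1; exact Or.inr h1
      simp [this]
    have hhead : ((a + 1) ∈ (a :: t)) ↔ ((a + 1) ∈ t) := by
      simp only [List.mem_cons]
      constructor
      · rintro (h1 | h1); · omega
        · exact h1
      · intro h1; exact Or.inr h1
    rw [List.map_cons, List.sum_cons, hmapt, ← ih ht]
    cases t with
    | nil => simp [pvAdj]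
    | cons b r =>
      have hab : a < b := ha b (by simp)
      have hbr : ∀ x ∈ r, b < x := (List.pairwise_cons.mp ht).1
      have : ((a + 1) ∈ (b :: r)) ↔ a + 1 = b := by
        simp only [List.mem_cons]
        constructor
        · rintro (h1 | h1)
          · omega
          · have := hbr _ h1; omega
        · intro h1; exact Or.inl h1
      simp only [pvAdj, hhead, this]

lemma pvRowA_eq (tolerance : Int) (h0 : 0 ≤ tolerance) (xs : PySem.Set Int) (hnd : xs.Nodup) :
    pvRowA tolerance xs = decide (tolerance < pvCountSucc xs) := by
  have hperm : (PySem.List.sorted xs (fun x => x) false).Perm xs := PySem.List.sorted_perm xs _ _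
  have hle : (PySem.List.sorted xs (fun x => x) false).Pairwise (fun a b => a ≤ b) :=
    PySem.List.sorted_pairwise xs (fun x => x)
  have hndL : (PySem.List.sorted xs (fun x => x) false).Nodup := hperm.nodup_iff.mpr hnd
  have hlt : (PySem.List.sorted xs (fun x => x) false).Pairwise (· < ·) := by
    have := hle.and hndL
    exact this.imp (fun {a b} hab => lt_of_le_of_ne hab.1 hab.2)
  have hcount : pvCountSucc xs
      = pvAdj (PySem.List.sorted xs (fun x => x) false) := by
    rw [pvCountSucc_eq_sum, pvAdj_eq_sum _ hlt]
    have hf : (fun x => if (x + 1) ∈ xs then (1 : Int) else 0)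
        = (fun x => if (x + 1) ∈ (PySem.List.sorted xs (fun x => x) false) then (1 : Int) else 0) := by
      funext x
      simp [hperm.mem_iff]
    rw [hf]
    exact (hperm.map _).sum_eq.symm
  unfold pvRowA
  cases hL : PySem.List.sorted xs (fun x => x) false with
  | nil =>
    rw [hcount, hL]
    simp [pvAdj]
    omega
  | cons a rest =>
    show pvScanA tolerance 0 a rest = decide (tolerance < pvCountSucc xs)
    rw [pvScanA_eq tolerance rest a 0 h0, hcount, hL]
    simp

lemma pvLoopA_eq_any (tolerance : Int) (items : List (Int × PySem.Set Int)) :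
    pvLoopA tolerance items = items.any (fun p => pvRowA tolerance p.2) := by
  induction items with
  | nil => simp [pvLoopA]
  | cons p rest ih =>
    obtain ⟨y, xs⟩ := p
    simp only [pvLoopA, List.any_cons, ih]
    by_cases h : pvRowA tolerance xs <;> simp [h]

-- every value set produced by the grouping fold is duplicate-free
lemma pvBuild_getD_nodup (rs : List ((Int × Int) × (Int × Int)))
    (d : PySem.Dict Int (PySem.Set Int)) (hd : ∀ y, (d.getD y PySem.Set.empty).Nodup) :
    ∀ y, ((rs.foldl
      (fun d p => d.insert p.1.2 (PySem.Set.add (d.getD p.1.2 PySem.Set.empty) p.1.1)) d).getD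
        y PySem.Set.empty).Nodup := by
  induction rs generalizing d with
  | nil => exact hd
  | cons r rest ih =>
    simp only [List.foldl_cons]
    apply ih
    intro y
    rw [PySem.Dict.getD_insert]
    split
    · exact PySem.Set.nodup_add _ _ (hd _)
    · exact hd y

lemma pvBuild_keys_nodup (robots : List ((Int × Int) × (Int × Int))) :
    (pvBuildRows robots).keys.Nodup := by
  unfold pvBuildRows
  exact PySem.Dict.nodup_keys_foldl_insert_key (κ := Int) (ν := PySem.Set Int) robots
    (fun p => p.1.2) (fun d p => PySem.Set.add (d.getD p.1.2 PySem.Set.empty) p.1.1)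
    PySem.Dict.empty PySem.Dict.nodup_keys_empty

-- membership in the grouped set at key y
lemma pvBuild_mem_getD (rs : List ((Int × Int) × (Int × Int)))
    (d : PySem.Dict Int (PySem.Set Int)) (y x : Int) :
    x ∈ ((rs.foldl
      (fun d p => d.insert p.1.2 (PySem.Set.add (d.getD p.1.2 PySem.Set.empty) p.1.1)) d).getD
        y PySem.Set.empty)
    ↔ x ∈ d.getD y PySem.Set.empty ∨ ∃ v, ((x, y), v) ∈ rs := by
  induction rs generalizing d with
  | nil => simp
  | cons r rest ih =>
    obtain ⟨⟨x0, y0⟩, v0⟩ := r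
    simp only [List.foldl_cons, ih, List.mem_cons]
    rw [PySem.Dict.getD_insert]
    by_cases hyy : y = y0
    · subst hyy
      rw [if_pos rfl]
      rw [PySem.Set.mem_add]
      constructor
      · rintro ((hm | rfl) | ⟨v, hv⟩)
        · exact Or.inl hm
        · exact Or.inr ⟨v0, Or.inl rfl⟩
        · exact Or.inr ⟨v, Or.inr hv⟩
      · rintro (hm | ⟨v, hv | hv⟩)
        · exact Or.inl (Or.inl hm)
        · rw [Prod.mk.injEq, Prod.mk.injEq] at hv
          exact Or.inl (Or.inr hv.1.1)
        · exact Or.inr ⟨v, hv⟩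
    · rw [if_neg hyy]
      constructor
      · rintro (hm | ⟨v, hv⟩)
        · exact Or.inl hm
        · exact Or.inr ⟨v, Or.inr hv⟩
      · rintro (hm | ⟨v, hv | hv⟩)
        · exact Or.inl hm
        · rw [Prod.mk.injEq, Prod.mk.injEq] at hv
          exact absurd hv.1.2 hyy
        · exact Or.inr ⟨v, hv⟩

lemma pvBuild_mem_keys (robots : List ((Int × Int) × (Int × Int))) (y : Int) :
    y ∈ (pvBuildRows robots).keys ↔ y ∈ robots.map (fun p => p.1.2) := by
  unfold pvBuildRows
  rw [PySem.Dict.keys_foldl_insert_key]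
  simp only [PySem.Dict.keys_empty]
  rw [PySem.Set.update_nil_left]
  exact PySem.Set.mem_ofList _ y

lemma pvAnyCongrMem {α : Type} (l : List α) (p q : α → Bool)
    (h : ∀ a ∈ l, p a = q a) : l.any p = l.any q := by
  induction l with
  | nil => rfl
  | cons a t ih =>
    simp only [List.any_cons]
    rw [h a (by simp), ih (fun b hb => h b (by simp [hb]))]

-- two distinct members force length ≥ 2
lemma pv_two_le_length {x1 x2 : Int} {l : List Int} (h1 : x1 ∈ l) (h2 : x2 ∈ l)
    (hne : x1 ≠ x2) : 2 ≤ l.length := by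
  match l with
  | [] => simp at h1
  | [a] =>
    simp at h1 h2
    exact absurd (h1.trans h2.symm) hne
  | a :: b :: t => simp only [List.length_cons]; omega

-- ===== VERDICT (by name: the statement is the Claim_ definition above) =====
theorem suspicious_spec : Claim_equal_suspicious := by
  intro robots tolerance _ hpre
  unfold Spec_suspicious suspicious suspicious_alt
  have hvals : (pvBuildRows robots).values = (pvBuildRows robots).items.map (fun p => p.2) := rfl
  have hknd := pvBuild_keys_nodup robots
  have hvnd : ∀ p ∈ (pvBuildRows robots).items, (p.2 : PySem.Set Int).Nodup := by
    intro p hp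
    have hp' : (p.1, p.2) ∈ (pvBuildRows robots).items := by
      rcases p with ⟨k, v⟩; exact hp
    have := PySem.Dict.getD_of_mem_items (pvBuildRows robots) hp' hknd PySem.Set.empty
    rw [← this]
    exact pvBuild_getD_nodup robots PySem.Dict.empty (by intro y; simp [PySem.Set.empty]) p.1
  rw [pvLoopA_eq_any, hvals, List.any_map]
  by_cases h0 : 0 ≤ tolerance
  · apply pvAnyCongrMem
    intro p hp
    exact pvRowA_eq tolerance h0 p.2 (hvnd p hp)
  · -- tolerance < 0: Pre_ leaves only robots = [] or a row with two distinct x's; both sides are then equal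
    rcases hpre with h | h | ⟨r, hr, r', hr', hy, hx⟩
    · omega
    · subst h; rfl
    · -- both sides are true at the row of key r.1.2
      have hneg : tolerance < 0 := by omega
      have hmemrow : ∀ (q : (Int × Int) × (Int × Int)), q ∈ robots →
          q.1.1 ∈ ((pvBuildRows robots).getD q.1.2 PySem.Set.empty) := by
        intro q hq
        unfold pvBuildRows
        rw [pvBuild_mem_getD]
        exact Or.inr ⟨q.2, by rcases q with ⟨⟨a, b⟩, v⟩; exact hq⟩
      set y := r.1.2 with hydef
      have hm1 : r.1.1 ∈ ((pvBuildRows robots).getD y PySem.Set.empty) := hmemrow r hr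
      have hm2 : r'.1.1 ∈ ((pvBuildRows robots).getD y PySem.Set.empty) := by
        have := hmemrow r' hr'
        rw [← hy] at this
        exact this
      have hitem : (y, (pvBuildRows robots).getD y PySem.Set.empty) ∈ (pvBuildRows robots).items := by
        rw [PySem.Dict.items_eq_map_keys (pvBuildRows robots) hknd PySem.Set.empty]
        apply List.mem_map.mpr
        refine ⟨y, ?_, rfl⟩
        rw [pvBuild_mem_keys]
        exact List.mem_map.mpr ⟨r, hr, rfl⟩
      set v := (pvBuildRows robots).getD y PySem.Set.empty with hvdef
      have hlen : 2 ≤ v.length := pv_two_le_length hm1 hm2 hx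
      have hrow : pvRowA tolerance v = true := by
        unfold pvRowA
        have hperm : (PySem.List.sorted v (fun x => x) false).Perm v := PySem.List.sorted_perm v _ _
        have hlenL : 2 ≤ (PySem.List.sorted v (fun x => x) false).length := by
          rw [hperm.length_eq]; exact hlen
        cases hL : PySem.List.sorted v (fun x => x) false with
        | nil => rw [hL] at hlenL; simp at hlenL
        | cons a rest =>
          cases rest with
          | nil => rw [hL] at hlenL; simp at hlenL
          | cons b r2 => exact pvScanA_of_neg tolerance hneg b r2 a 0 le_rfl
      have hcnt : decide (tolerance < pvCountSucc v) = true := by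
        have := pvCountSucc_nonneg v
        simp; omega
      have hA : ((pvBuildRows robots).items.any (fun p => pvRowA tolerance p.2)) = true :=
        List.any_eq_true.mpr ⟨(y, v), hitem, hrow⟩
      have hB : ((pvBuildRows robots).items.any
          (fun p => decide (tolerance < pvCountSucc p.2))) = true :=
        List.any_eq_true.mpr ⟨(y, v), hitem, hcnt⟩
      rw [hA]
      have : (fun p : Int × PySem.Set Int => decide (pvCountSucc p.2 > tolerance))
          = (fun p : Int × PySem.Set Int => decide (tolerance < pvCountSucc p.2)) := rfl
      rw [show ((fun xs => decide (pvCountSucc xs > tolerance)) ∘ (fun p : Int × PySem.Set Int => p.2))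
            = (fun p : Int × PySem.Set Int => decide (tolerance < pvCountSucc p.2)) from rfl, hB]
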